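-- pv_equiv track=rewrite | github.com/kamyk2060/PythonKacperDawid | Zestaw03/ZADANIE 3.6.py | RysujProstokat
-- ===== SOURCE A (Python) =====
-- def RysujProstokat(kolumny, wiersze):
--     if kolumny == 0 or wiersze == 0:
--         return ""
--
--     result = ""
--
--     # Górna krawędź
--     result += "+" + "---+" * kolumny + "\n"
--
--     for w in range(wiersze):
--         # Wiersz z komórkami
--         result += "|" + "   |" * kolumny + "\n"
--         # Separator między wierszami
--         result += "+" + "---+" * kolumny + "\n"
--
--     return result
-- ===== SOURCE B (Python) =====
-- def RysujProstokat(kolumny, wiersze):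
--     if kolumny == 0 or wiersze == 0:
--         return ""
--     edge = "+---" * kolumny + "+\n"
--     cell = edge.translate(str.maketrans("+-", "| "))
--     return (edge + cell) * wiersze + edge
-- ===== Notes on version B (the rewrite author's own statement) =====
-- stated objective: alternative
-- what changed: B builds only the border line, derives the cell line from it by per-character translation (+->|, --> space), and assembles the whole picture by closed-form repetition (edge+cell)*wiersze+edge instead of A's per-row accumulation loop that builds both lines independently.
import Mathlib
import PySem

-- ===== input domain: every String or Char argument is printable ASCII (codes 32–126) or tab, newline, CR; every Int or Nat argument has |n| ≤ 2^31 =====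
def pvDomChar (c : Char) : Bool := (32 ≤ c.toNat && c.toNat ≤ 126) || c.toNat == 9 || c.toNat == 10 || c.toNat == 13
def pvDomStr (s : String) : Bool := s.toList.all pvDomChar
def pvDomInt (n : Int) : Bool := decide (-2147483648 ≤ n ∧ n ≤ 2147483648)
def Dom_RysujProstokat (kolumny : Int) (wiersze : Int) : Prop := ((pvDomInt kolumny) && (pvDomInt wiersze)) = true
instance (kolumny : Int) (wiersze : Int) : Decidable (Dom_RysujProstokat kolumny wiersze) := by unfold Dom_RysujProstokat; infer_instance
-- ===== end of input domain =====

-- B builds only the border line, derives the cell line from it by per-character translation, and assembles the picture by closed-form repetition instead of A's per-row accumulation loop; same cost, different construction.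

-- ===== PORT A =====
def RysujProstokat (kolumny : Int) (wiersze : Int) : String :=
  if kolumny == 0 || wiersze == 0 then "" else
    -- result = ""; result += "+" + "---+"*kolumny + "\n"
    let result : List Char := [] ++ ('+' :: (PySem.List.pyRepeat ['-','-','-','+'] kolumny ++ ['\n']))
    -- for w in range(wiersze): result += "|" + "   |"*kolumny + "\n"; result += "+" + "---+"*kolumny + "\n"
    let result := (PySem.List.pyRange 0 wiersze 1).foldl
      (fun acc _ =>
        acc ++ ('|' :: (PySem.List.pyRepeat [' ',' ',' ','|'] kolumny ++ ['\n']))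
            ++ ('+' :: (PySem.List.pyRepeat ['-','-','-','+'] kolumny ++ ['\n']))) result
    String.ofList result

-- ===== PORT B =====
-- str.translate(str.maketrans("+-", "| ")): each character is mapped through the
-- two-entry table, all others are unchanged — exact as a per-character map.
def pvTrB (c : Char) : Char := if c = '+' then '|' else if c = '-' then ' ' else c

def RysujProstokat_alt (kolumny : Int) (wiersze : Int) : String :=
  if kolumny == 0 || wiersze == 0 then "" else
    let edge : List Char := PySem.List.pyRepeat ['+','-','-','-'] kolumny ++ ['+', '\n']
    let cell : List Char := edge.map pvTrB
    String.ofList (PySem.List.pyRepeat (edge ++ cell) wiersze ++ edge)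

-- ===== PRECONDITION & SPEC =====
def Spec_RysujProstokat (kolumny : Int) (wiersze : Int) (out : String) : Prop := out = RysujProstokat_alt kolumny wiersze
instance (kolumny : Int) (wiersze : Int) (out : String) : Decidable (Spec_RysujProstokat kolumny wiersze out) := by unfold Spec_RysujProstokat; infer_instance

-- ===== CLAIM (what is proved, stated in full; the proofs are below) =====
def Claim_equal_RysujProstokat : Prop := ∀ (kolumny : Int) (wiersze : Int), Dom_RysujProstokat kolumny wiersze → Spec_RysujProstokat kolumny wiersze (RysujProstokat kolumny wiersze)

-- ===== LEMMAS AND PROOFS =====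

-- A's loop body ignores the loop variable: the fold appends one fixed block per iteration.
theorem pv_foldl_const_append {α : Type} (l : List Int) (c e init : List α) :
    l.foldl (fun acc _ => acc ++ c ++ e) init = init ++ (List.replicate l.length (c ++ e)).flatten := by
  induction l generalizing init with
  | nil => simp
  | cons x t ih =>
    rw [List.foldl_cons, ih, List.length_cons, List.replicate_succ]
    simp [List.append_assoc]

-- phase shift: 'a' then n copies of [b,c,d,a] then t = n copies of [a,b,c,d] then 'a'::t
theorem pv_shift {α : Type} (a b c d : α) (n : Nat) (t : List α) :
    a :: ((List.replicate n [b, c, d, a]).flatten ++ t)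
      = (List.replicate n [a, b, c, d]).flatten ++ a :: t := by
  induction n with
  | zero => simp
  | succ m ih => simp [List.replicate_succ, ih]

theorem pvTrB_plus : pvTrB '+' = '|' := by decide
theorem pvTrB_minus : pvTrB '-' = ' ' := by decide
theorem pvTrB_nl : pvTrB '\n' = '\n' := by decide

-- regrouping: e ++ (c ++ e)^n = (e ++ c)^n ++ e
theorem pv_regroup {α : Type} (e c : List α) (n : Nat) :
    e ++ (List.replicate n (c ++ e)).flatten
      = (List.replicate n (e ++ c)).flatten ++ e := by
  induction n with
  | zero => simp
  | succ m ih =>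
    simp only [List.replicate_succ, List.flatten_cons, List.append_assoc]
    rw [← List.append_assoc e, ← List.append_assoc e, ih]

-- ===== VERDICT (by name: the statement is the Claim_ definition above) =====
theorem RysujProstokat_spec : Claim_equal_RysujProstokat := by
  intro kolumny wiersze _
  unfold Spec_RysujProstokat RysujProstokat RysujProstokat_alt
  by_cases h : (kolumny == 0 || wiersze == 0) = true
  · simp [h]
  · simp only [h, Bool.false_eq_true, not_false_eq_true, if_neg]
    rw [pv_foldl_const_append]
    simp only [PySem.List.pyRepeat, PySem.List.length_pyRange_one, List.map_append,
      List.map_flatten, List.map_replicate, List.map_cons, List.map_nil, List.nil_append,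
      pvTrB_plus, pvTrB_minus, pvTrB_nl]
    rw [pv_shift '+' '-' '-' '-' kolumny.toNat, pv_shift '|' ' ' ' ' ' ' kolumny.toNat,
      pv_regroup]
    norm_num
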